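-- pv_equiv track=rewrite | github.com/pypi-data/pypi-mirror-160 | packages/wmb/wmb-0.0.17-py3-none-any.whl/wmb/annot/integration.py | _concat_non_nan_groups
-- ===== SOURCE A (Python) =====
-- def _concat_non_nan_groups(ll):
--     nl = []
--     for g in ll:
--         if g != 'nan':
--             nl.append(g)
--         else:
--             break
--     return '_'.join(nl)
-- ===== SOURCE B (Python) =====
-- def _concat_non_nan_groups(ll):
--     if 'nan' in ll:
--         prefix = ll[:ll.index('nan')]
--     else:
--         prefix = ll
--     return '_'.join(prefix)
-- ===== Notes on version B (the rewrite author's own statement) =====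
-- stated objective: idiomatic
-- what changed: B locates the first 'nan' with a membership test plus list.index and takes one prefix slice, instead of A's element-by-element accumulation loop with a break.
import Mathlib
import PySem

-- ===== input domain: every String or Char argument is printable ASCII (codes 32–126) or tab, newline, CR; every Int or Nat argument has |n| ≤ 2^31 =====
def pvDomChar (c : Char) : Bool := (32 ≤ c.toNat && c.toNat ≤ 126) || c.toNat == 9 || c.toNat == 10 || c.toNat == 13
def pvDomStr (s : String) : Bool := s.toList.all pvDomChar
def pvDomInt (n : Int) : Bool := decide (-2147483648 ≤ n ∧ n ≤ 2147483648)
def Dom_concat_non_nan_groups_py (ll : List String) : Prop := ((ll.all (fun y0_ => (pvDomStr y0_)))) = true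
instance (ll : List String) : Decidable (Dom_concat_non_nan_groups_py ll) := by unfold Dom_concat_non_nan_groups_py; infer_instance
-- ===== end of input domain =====

-- B finds the first 'nan' via membership + list.index and takes a single prefix slice
-- instead of A's element-by-element append loop with a break; return values agree everywhere.

-- ===== PORT A =====
-- A's for-loop with break: append each g ≠ 'nan', stop at the first 'nan'.
def pvA_loop : List String → List String
  | [] => []
  | g :: rest => if g ≠ "nan" then g :: pvA_loop rest else []

def concat_non_nan_groups_py (ll : List String) : String :=
  PySem.Str.join "_" (pvA_loop ll)

-- ===== PORT B =====
def concat_non_nan_groups_py_alt (ll : List String) : String :=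
  let pre :=
    if ll.contains "nan" then
      match PySem.List.index? ll "nan" with
      | some i => PySem.List.slice ll none (some (i : Int))
      | none => ll
    else ll
  PySem.Str.join "_" pre

-- ===== PRECONDITION & SPEC =====
def Spec_concat_non_nan_groups_py (ll : List String) (out : String) : Prop := out = concat_non_nan_groups_py_alt ll
instance (ll : List String) (out : String) : Decidable (Spec_concat_non_nan_groups_py ll out) := by unfold Spec_concat_non_nan_groups_py; infer_instance

-- ===== CLAIM (what is proved, stated in full; the proofs are below) =====
def Claim_equal_concat_non_nan_groups_py : Prop := ∀ (ll : List String), Dom_concat_non_nan_groups_py ll → Spec_concat_non_nan_groups_py ll (concat_non_nan_groups_py ll)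

-- ===== LEMMAS AND PROOFS =====
theorem pvA_loop_eq_take (ll : List String) :
    pvA_loop ll = (match List.idxOf? "nan" ll with
                   | some i => ll.take i
                   | none => ll) := by
  induction ll with
  | nil => simp [pvA_loop]
  | cons g rest ih =>
    by_cases hg : g = "nan"
    · subst hg
      simp [pvA_loop, List.idxOf?_cons]
    · have hb : (g == "nan") = false := by
        simpa using hg
      cases h : List.idxOf? "nan" rest with
      | none => simp [pvA_loop, hg, ih, h, List.idxOf?_cons, hb]
      | some i => simp [pvA_loop, hg, ih, h, List.idxOf?_cons, hb]

-- ===== VERDICT (by name: the statement is the Claim_ definition above) =====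
theorem concat_non_nan_groups_py_spec : Claim_equal_concat_non_nan_groups_py := by
  intro ll _
  unfold Spec_concat_non_nan_groups_py concat_non_nan_groups_py concat_non_nan_groups_py_alt
  rw [pvA_loop_eq_take]
  simp only [PySem.List.index?_eq_idxOf?]
  by_cases hmem : "nan" ∈ ll
  · cases h : List.idxOf? "nan" ll with
    | none => exact absurd (List.idxOf?_eq_none_iff.mp h) (by simpa using hmem)
    | some i =>
      simp only [List.contains_eq_mem, hmem, decide_true, if_true,
        PySem.List.slice_to_natCast]
  · have hnone : List.idxOf? "nan" ll = none := List.idxOf?_eq_none_iff.mpr (by simpa using hmem)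
    simp [hnone, List.contains_eq_mem, hmem]
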